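-- pv_equiv track=rewrite | github.com/mew27/AoC2020 | Day14.py | write_mem_dec2
-- ===== SOURCE A (Python) =====
-- def return_adresses(string):
--     adress_list = []
--     for x in list(string):
--         if x == 'X':
--             adress_list.extend(return_adresses(string.replace('X', '0', 1)))
--             adress_list.extend(return_adresses(string.replace('X', '1', 1)))
--             break
--
--     if adress_list == []:
--         adress_list = [int(string, 2)]
--
--     return adress_list
--
-- def write_mem_dec2(istructions):
--     mem = {}
--     address_list = []
--     mask = ''
--     for instruction in istructions:
--         if instruction[0] == 'mask':
--             mask = instruction[1]
--         elif instruction[0] == 'm':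
--             address_list = return_adresses(decode_address( list(str(bin(int(instruction[1])))[2:].zfill(36)), list(mask)))
--             for address in address_list:
--                 mem[address] = (instruction[2])
--
--     return mem
--
-- def decode_address(adrress, mask):
--     for idx, i in enumerate(mask, 0):
--         if i == 'X' or i == '1':
--             adrress[idx] = i
--
--     return ''.join(adrress)
-- ===== SOURCE B (Python) =====
-- # Same result as A; enumerates the floating addresses with an iterative left-to-right
-- # fold over the masked bit string (breadth-first doubling) instead of A's recursive
-- # first-X string.replace enumeration, and never re-parses intermediate strings.
-- def write_mem_dec2(istructions):
--     mem = {}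
--     mask = ''
--     for instruction in istructions:
--         if instruction[0] == 'mask':
--             mask = instruction[1]
--         elif instruction[0] == 'm':
--             bits = list(bin(int(instruction[1]))[2:].zfill(36))
--             for idx, c in enumerate(mask):
--                 if c == 'X' or c == '1':
--                     bits[idx] = c
--             addresses = [0]
--             for c in bits:
--                 if c == 'X':
--                     addresses = [2 * a + b for a in addresses for b in (0, 1)]
--                 else:
--                     addresses = [2 * a + (1 if c == '1' else 0) for a in addresses]
--             for address in addresses:
--                 mem[address] = instruction[2]
--     return mem
-- ===== Notes on version B (the rewrite author's own statement) =====
-- stated objective: alternative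
-- what changed: A enumerates the floating addresses by recursively substituting the first 'X' of the masked bit string with string.replace and re-parsing every final string with int(,2); B makes one left-to-right pass over the masked bits, doubling an integer address list at each 'X' and shifting the bit in otherwise, so no intermediate strings are built or re-parsed.
import Mathlib
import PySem

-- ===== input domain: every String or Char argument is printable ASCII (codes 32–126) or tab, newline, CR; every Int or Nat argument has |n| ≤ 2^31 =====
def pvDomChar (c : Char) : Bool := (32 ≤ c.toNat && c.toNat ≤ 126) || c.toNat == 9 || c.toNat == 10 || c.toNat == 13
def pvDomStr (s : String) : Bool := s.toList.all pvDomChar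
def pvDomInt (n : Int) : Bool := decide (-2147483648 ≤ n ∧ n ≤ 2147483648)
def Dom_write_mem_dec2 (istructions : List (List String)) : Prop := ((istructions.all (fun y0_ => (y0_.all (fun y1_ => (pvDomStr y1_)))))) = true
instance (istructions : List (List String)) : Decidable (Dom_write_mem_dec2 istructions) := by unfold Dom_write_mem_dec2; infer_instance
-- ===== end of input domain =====

-- B replaces A's recursive first-X string.replace enumeration of the floating addresses by a
-- single left-to-right fold over the masked bit string that doubles an address list at each 'X'
-- (objective: alternative algorithm, no string re-parsing; equivalence is about the return value).

-- ===== SHARED HELPERS (identical lines in both Pythons: bin/zfill/mask application) =====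
-- list(str(bin(int_value))[2:].zfill(36)) ; exact, PySem.Int.toBinChars0b = bin(n)
def pvAddr36 (v : Int) : List Char := PySem.Chars.zfill ((PySem.Int.toBinChars0b v).drop 2) 36

-- decode_address: for idx, i in enumerate(mask): if i=='X' or i=='1': adrress[idx] = i
-- (Python raises IndexError if the mask is longer than the address — excluded by Pre_;
--  PySem.List.pySetD is a no-op there)
def pvDecode (adrress : List Char) (mask : List Char) : List Char :=
  (PySem.List.enumerate mask 0).foldl
    (fun a p => if p.2 = 'X' ∨ p.2 = '1' then PySem.List.pySetD a p.1 p.2 else a) adrress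

-- ===== PORT A =====
-- string.replace('X', c, 1): replace the first 'X'
def pvReplFirstX (c : Char) : List Char → List Char
  | [] => []
  | x :: xs => if x = 'X' then c :: xs else x :: pvReplFirstX c xs

lemma pvReplFirstX_count_lt (c : Char) (hc : c ≠ 'X') :
    ∀ (l : List Char), 'X' ∈ l → (pvReplFirstX c l).count 'X' < l.count 'X' := by
  intro l hl
  induction l with
  | nil => cases hl
  | cons x xs ih =>
    by_cases hx : x = 'X'
    · subst hx
      simp [pvReplFirstX, hc]
    · have hmem : 'X' ∈ xs := by
        cases hl with
        | head => exact absurd rfl hx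
        | tail _ h => exact h
      have := ih hmem
      simp [pvReplFirstX, hx]
      omega

-- int(string, 2): ported by hand as the binary-digit fold; exact on strings of '0'/'1',
-- which are the only strings reaching it when A returns (Pre_ excludes the rest, where
-- Python raises ValueError or the character was overwritten by the mask anyway)
def pvBinVal (l : List Char) : Int :=
  l.foldl (fun a c => 2 * a + (if c = '1' then 1 else 0)) 0

def return_adresses (l : List Char) : List Int :=
  -- the for/break loop: the body fires iff the string contains an 'X'
  let adress_list :=
    if h : 'X' ∈ l then
      return_adresses (pvReplFirstX '0' l) ++ return_adresses (pvReplFirstX '1' l)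
    else []
  if adress_list = [] then [pvBinVal l] else adress_list
termination_by l.count 'X'
decreasing_by
  · exact pvReplFirstX_count_lt '0' (by decide) l h
  · exact pvReplFirstX_count_lt '1' (by decide) l h

def pvStepA (st : PySem.Dict Int String × String) (instruction : List String) :
    PySem.Dict Int String × String :=
  match instruction with
  | [] => st  -- Python raises IndexError on instruction[0] (excluded by Pre_)
  | i0 :: rest =>
    if i0 = "mask" then
      (st.1, PySem.List.pyGetD rest 0 "")  -- instruction[1] (missing ⇒ IndexError, excluded)
    else if i0 = "m" then
      let v := (PySem.Int.ofStr? (PySem.List.pyGetD rest 0 "")).getD 0  -- int() ValueError excluded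
      let address_list := return_adresses (pvDecode (pvAddr36 v) st.2.toList)
      (address_list.foldl (fun m a => m.insert a (PySem.List.pyGetD rest 1 "")) st.1, st.2)
    else st

def write_mem_dec2 (istructions : List (List String)) : List (Int × String) :=
  (istructions.foldl pvStepA (PySem.Dict.empty, "")).1.items

-- ===== PORT B =====
-- addresses = [0]; for c in bits: double at 'X', else shift in the bit
def pvExpand (bits : List Char) : List Int :=
  bits.foldl
    (fun addresses c =>
      if c = 'X' then addresses.flatMap (fun a => [2 * a, 2 * a + 1])
      else addresses.map (fun a => 2 * a + (if c = '1' then 1 else 0)))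
    [0]

def pvStepB (st : PySem.Dict Int String × String) (instruction : List String) :
    PySem.Dict Int String × String :=
  match instruction with
  | [] => st
  | i0 :: rest =>
    if i0 = "mask" then
      (st.1, PySem.List.pyGetD rest 0 "")
    else if i0 = "m" then
      let v := (PySem.Int.ofStr? (PySem.List.pyGetD rest 0 "")).getD 0
      let addresses := pvExpand (pvDecode (pvAddr36 v) st.2.toList)
      (addresses.foldl (fun m a => m.insert a (PySem.List.pyGetD rest 1 "")) st.1, st.2)
    else st

def write_mem_dec2_alt (istructions : List (List String)) : List (Int × String) :=
  (istructions.foldl pvStepB (PySem.Dict.empty, "")).1.items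

-- ===== PRECONDITION & SPEC =====
def pvAt (xs : List (List String)) (i : Nat) : List String := xs.getD i []

-- per-instruction shape: nonempty; a "mask" needs an argument; an "m" needs two, the first an
-- int() -parseable, nonnegative value (int() raises ValueError otherwise; a negative value makes
-- int(..., 2) raise on the 'b' of bin(); the rare negative inputs whose mask overwrites that 'b',
-- on which A still returns, are excluded too — B returns the same value there, see claim cites)
def pvInstrOK : List String → Bool
  | [] => false
  | i0 :: rest =>
    (i0 != "mask" || !rest.isEmpty) &&
    (i0 != "m" || (decide (2 ≤ rest.length) &&
                   decide (0 ≤ (PySem.Int.ofStr? (rest.headD "")).getD (-1))))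

-- at every write instruction j, the mask in force (the latest preceding "mask" instruction i)
-- must fit the 36-or-longer binary address string, else decode_address raises IndexError
def pvMaskLenOK (xs : List (List String)) : Bool :=
  (List.range xs.length).all fun j =>
    (pvAt xs j).headD "" != "m" ||
    (List.range j).all fun i =>
      (pvAt xs i).headD "" != "mask" ||
      !((List.range j).all fun k => decide (k ≤ i) || (pvAt xs k).headD "" != "mask") ||
      decide (((pvAt xs i).getD 1 "").toList.length ≤
        max 36 (PySem.Int.bitLength
          ((PySem.Int.ofStr? ((pvAt xs j).getD 1 "")).getD 0)))

-- Pre_: exactly the inputs where Python A raises no exception: every instruction well-shaped, and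
-- every write's governing mask fits its address (see the two comments above)
def Pre_write_mem_dec2 (istructions : List (List String)) : Prop :=
  (∀ l ∈ istructions, pvInstrOK l = true) ∧ pvMaskLenOK istructions = true
instance (istructions : List (List String)) : Decidable (Pre_write_mem_dec2 istructions) := by
  unfold Pre_write_mem_dec2; infer_instance

def pvWitness_write_mem_dec2 : List (List String) :=
  [["mask", "X1"], ["m", "4", "7"], ["mask", "0X"], ["m", "1", "8"]]

def Spec_write_mem_dec2 (istructions : List (List String)) (out : List (Int × String)) : Prop := out = write_mem_dec2_alt istructions
instance (istructions : List (List String)) (out : List (Int × String)) : Decidable (Spec_write_mem_dec2 istructions out) := by unfold Spec_write_mem_dec2; infer_instance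

-- ===== CLAIM (what is proved, stated in full; the proofs are below) =====
def Claim_equal_write_mem_dec2 : Prop := ∀ (istructions : List (List String)), Dom_write_mem_dec2 istructions → Pre_write_mem_dec2 istructions → Spec_write_mem_dec2 istructions (write_mem_dec2 istructions)

-- ===== LEMMAS AND PROOFS =====

-- the one-step expansion function of pvExpand
def pvStepX (addresses : List Int) (c : Char) : List Int :=
  if c = 'X' then addresses.flatMap (fun a => [2 * a, 2 * a + 1])
  else addresses.map (fun a => 2 * a + (if c = '1' then 1 else 0))

lemma pvExpand_eq_foldl (bits : List Char) : pvExpand bits = bits.foldl pvStepX [0] := rfl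

-- an X-free suffix maps a singleton to the singleton of its shifted-in value
lemma pvFoldl_singleton (l : List Char) (hl : 'X' ∉ l) (a : Int) :
    l.foldl pvStepX [a] = [l.foldl (fun v c => 2 * v + (if c = '1' then 1 else 0)) a] := by
  induction l generalizing a with
  | nil => rfl
  | cons c cs ih =>
    have hc : c ≠ 'X' := fun h => hl (h ▸ List.mem_cons_self)
    have hcs : 'X' ∉ cs := fun h => hl (List.mem_cons_of_mem _ h)
    simp [List.foldl_cons, pvStepX, hc, ih hcs]

-- pvStepX distributes over ++, hence so does the whole fold
lemma pvFoldl_append (l : List Char) (xs ys : List Int) :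
    l.foldl pvStepX (xs ++ ys) = l.foldl pvStepX xs ++ l.foldl pvStepX ys := by
  induction l generalizing xs ys with
  | nil => rfl
  | cons c cs ih =>
    have hstep : pvStepX (xs ++ ys) c = pvStepX xs c ++ pvStepX ys c := by
      unfold pvStepX; split <;> simp
    simp [List.foldl_cons, hstep, ih]

-- first-occurrence decomposition of a string containing 'X'
lemma pvFirstX_split (l : List Char) (hl : 'X' ∈ l) :
    ∃ p s, l = p ++ 'X' :: s ∧ 'X' ∉ p ∧ ∀ c, pvReplFirstX c l = p ++ c :: s := by
  induction l with
  | nil => cases hl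
  | cons x xs ih =>
    by_cases hx : x = 'X'
    · exact ⟨[], xs, by simp [hx], by simp, fun c => by simp [pvReplFirstX, hx]⟩
    · have hmem : 'X' ∈ xs := by
        cases hl with
        | head => exact absurd rfl hx
        | tail _ h => exact h
      obtain ⟨p, s, h1, h2, h3⟩ := ih hmem
      exact ⟨x :: p, s, by simp [h1], by simp [h2, eq_comm, hx],
        fun c => by simp [pvReplFirstX, hx, h3 c]⟩

lemma return_adresses_ne_nil (l : List Char) : return_adresses l ≠ [] := by
  rw [return_adresses]
  split <;> split <;> simp_all

-- MAIN LEMMA: A's recursive enumeration equals B's left-to-right fold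
lemma return_adresses_eq_pvExpand (l : List Char) : return_adresses l = pvExpand l := by
  generalize hn : l.count 'X' = n
  induction n using Nat.strong_induction_on generalizing l with
  | _ n ih =>
    by_cases h : 'X' ∈ l
    · obtain ⟨p, s, hps, hpX, hrepl⟩ := pvFirstX_split l h
      have h0 : (pvReplFirstX '0' l).count 'X' < n := hn ▸ pvReplFirstX_count_lt '0' (by decide) l h
      have h1 : (pvReplFirstX '1' l).count 'X' < n := hn ▸ pvReplFirstX_count_lt '1' (by decide) l h
      have ih0 := ih _ h0 (pvReplFirstX '0' l) rfl
      have ih1 := ih _ h1 (pvReplFirstX '1' l) rfl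
      have hne : return_adresses (pvReplFirstX '0' l) ++ return_adresses (pvReplFirstX '1' l) ≠ [] := by
        simp [return_adresses_ne_nil]
      rw [return_adresses]
      simp only [h, dif_pos, if_neg hne]
      rw [ih0, ih1, hrepl '0', hrepl '1', pvExpand_eq_foldl, pvExpand_eq_foldl,
        pvExpand_eq_foldl, hps]
      rw [List.foldl_append, List.foldl_append, List.foldl_append,
        pvFoldl_singleton p hpX 0, List.foldl_cons, List.foldl_cons, List.foldl_cons]
      set v : Int := p.foldl (fun v c => 2 * v + (if c = '1' then 1 else 0)) (0 : Int) with hv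
      have hX : pvStepX [v] 'X' = [2 * v] ++ [2 * v + 1] := by simp [pvStepX]
      have h0' : pvStepX [v] '0' = [2 * v] := by simp [pvStepX]
      have h1' : pvStepX [v] '1' = [2 * v + 1] := by simp [pvStepX]
      rw [hX, h0', h1', pvFoldl_append]
    · rw [return_adresses, pvExpand_eq_foldl, pvFoldl_singleton l h 0]
      simp [h, pvBinVal]

lemma pvStepA_eq_pvStepB : pvStepA = pvStepB := by
  funext st instruction
  cases instruction with
  | nil => rfl
  | cons i0 rest =>
    simp only [pvStepA, pvStepB, return_adresses_eq_pvExpand]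

-- ===== VERDICT (by name: the statement is the Claim_ definition above) =====
theorem write_mem_dec2_spec : Claim_equal_write_mem_dec2 := by
  intro istructions _ _
  unfold Spec_write_mem_dec2 write_mem_dec2 write_mem_dec2_alt
  rw [pvStepA_eq_pvStepB]
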